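-- pv_equiv track=rewrite | github.com/ethanlchristensen/AdventOfCode2024 | solutions/15-day-fifteen/15-day-fifteen.py | push_boxes_left_right
-- ===== SOURCE A (Python) =====
-- def push_boxes_left_right(point, dir, data):
--     points = [point]
--     current_point = point
--     current_point_value = data[point[1]][point[0]]
--     while current_point_value != ".":
--         current_point = current_point[0] + dir[0], current_point[1] + dir[1]
--         current_point_value = data[current_point[1]][current_point[0]]
--         points.append(current_point)
--
--     for idx in range(len(points) - 1,  0, -1):
--         p1 = points[idx]
--         p2 = points[idx - 1]
--         tmp = data[p1[1]][p1[0]]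
--         data[p1[1]][p1[0]] = data[p2[1]][p2[0]]
--         data[p2[1]][p2[0]] = tmp
--
--     return data
-- ===== SOURCE B (Python) =====
-- def push_boxes_left_right(point, dir, data):
--     # One forward pass with a carried value: shift the whole line of boxes one
--     # step in `dir`, leaving "." at the starting point.  Mutates `data` in
--     # place and returns it, like the original.
--     x, y = point
--     carry = "."
--     while True:
--         cur = data[y][x]
--         data[y][x] = carry
--         if cur == ".":
--             break
--         carry = cur
--         x += dir[0]
--         y += dir[1]
--     return data
-- ===== Notes on version B (the rewrite author's own statement) =====
-- stated objective: simpler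
-- what changed: Replaces A's two phases (collect the visited points in a list, then a second backward pass swapping adjacent points) with a single forward pass that carries the displaced value, using no points list at all.
import Mathlib
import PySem

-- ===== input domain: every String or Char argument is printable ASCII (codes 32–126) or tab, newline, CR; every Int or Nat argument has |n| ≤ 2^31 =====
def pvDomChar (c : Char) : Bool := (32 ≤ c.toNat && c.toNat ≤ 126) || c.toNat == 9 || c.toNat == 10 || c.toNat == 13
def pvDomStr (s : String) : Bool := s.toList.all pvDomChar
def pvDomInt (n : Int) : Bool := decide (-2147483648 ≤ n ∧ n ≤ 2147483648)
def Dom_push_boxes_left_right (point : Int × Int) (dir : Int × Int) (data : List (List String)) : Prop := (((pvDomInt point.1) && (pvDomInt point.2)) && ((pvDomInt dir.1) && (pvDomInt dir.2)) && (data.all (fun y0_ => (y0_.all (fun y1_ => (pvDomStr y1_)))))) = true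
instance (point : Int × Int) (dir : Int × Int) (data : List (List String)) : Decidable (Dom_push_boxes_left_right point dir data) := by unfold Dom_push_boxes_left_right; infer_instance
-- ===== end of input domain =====

-- B replaces A's two phases (collect the visited points, then swap backwards) by a single
-- forward pass carrying the displaced value; equivalence is about the RETURN value only
-- (both Pythons mutate `data` in place and return it, with the same final contents).

-- Shared grid primitives (Python `data[y][x]` read / write, with Python index semantics).
def pvShape (data : List (List String)) : List Nat := data.map List.length

-- Python index normalisation of the pair (x, y) against the grid's shape:
-- row index first (data[y]), then column index within that row.
def pvEff (sh : List Nat) (p : Int × Int) : Option (Nat × Nat) :=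
  (PySem.List.pyIdx? sh.length p.2).bind fun r =>
    (PySem.List.pyIdx? (sh.getD r 0) p.1).bind fun c => some (r, c)

-- data[p[1]][p[0]]  (none = IndexError)
def pvGetCell (data : List (List String)) (p : Int × Int) : Option String :=
  (PySem.List.pyGet? data p.2).bind fun row => PySem.List.pyGet? row p.1

def pvSetEff (d : List (List String)) (e : Nat × Nat) (v : String) : List (List String) :=
  d.set e.1 ((d.getD e.1 []).set e.2 v)

-- data[p[1]][p[0]] = v ; the none branch is never reached on admitted inputs
-- (every write in both programs is at a cell that was read successfully first).
def pvSetCell (d : List (List String)) (p : Int × Int) (v : String) : List (List String) :=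
  match pvEff (pvShape d) p with
  | none => d
  | some e => pvSetEff d e v

-- fuel bound: a successful walk visits pairwise-distinct cells, so it has at most
-- (total number of cells) steps; the +1 covers the final '.' read.
def pvFuel (data : List (List String)) : Nat := (data.map List.length).sum + 1

-- ===== PORT A =====
-- the while loop: collects `points` (the Python list, starting with `point`);
-- none = IndexError during the walk (or fuel exhausted, which Pre_ rules out).
def pvWalkA (dir : Int × Int) (data : List (List String)) :
    Nat → (Int × Int) → List (Int × Int) → Option (List (Int × Int))
  | 0, _, _ => none
  | f + 1, cur, acc =>
    match pvGetCell data cur with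
    | none => none
    | some v =>
      if v = "." then some (acc ++ [cur])
      else pvWalkA dir data f (cur.1 + dir.1, cur.2 + dir.2) (acc ++ [cur])

-- the body of the for loop: tmp = data[p1]; data[p1] = data[p2]; data[p2] = tmp
def pvSwapStep (d : List (List String)) (p1 p2 : Int × Int) : List (List String) :=
  match pvGetCell d p1, pvGetCell d p2 with
  | some a, some b => pvSetCell (pvSetCell d p1 b) p2 a
  | _, _ => d

def push_boxes_left_right (point : Int × Int) (dir : Int × Int) (data : List (List String)) : List (List String) :=
  match pvWalkA dir data (pvFuel data) point [] with
  | none => data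
  | some points =>
    (PySem.List.pyRange ((points.length : Int) - 1) 0 (-1)).foldl
      (fun d idx =>
        match PySem.List.pyGet? points idx, PySem.List.pyGet? points (idx - 1) with
        | some p1, some p2 => pvSwapStep d p1 p2
        | _, _ => d) data

-- ===== PORT B =====
-- while True: cur = data[y][x]; data[y][x] = carry; if cur == ".": break; carry = cur; advance
def pvLoopB (dir : Int × Int) :
    Nat → (Int × Int) → String → List (List String) → List (List String)
  | 0, _, _, d => d
  | f + 1, cur, carry, d =>
    match pvGetCell d cur with
    | none => d
    | some v =>
      let d' := pvSetCell d cur carry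
      if v = "." then d' else pvLoopB dir f (cur.1 + dir.1, cur.2 + dir.2) v d'

def push_boxes_left_right_alt (point : Int × Int) (dir : Int × Int) (data : List (List String)) : List (List String) :=
  pvLoopB dir (pvFuel data) point "." data

-- ===== PRECONDITION & SPEC =====
def pvPos (point dir : Int × Int) (i : Nat) : Int × Int :=
  (point.1 + i * dir.1, point.2 + i * dir.2)

-- Pre_ holds exactly when A's walk from `point` reaches a "." cell (so A returns; an
-- IndexError walk or a dir=(0,0) infinite loop is excluded) AND no two visited cells
-- alias through Python negative-index wraparound.  The aliasing corner is excluded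
-- although A returns there: which cell a swap hits then is an accident of Python's
-- negative-index wraparound, and A's and B's results are equally arbitrary on it.
def Pre_push_boxes_left_right (point : Int × Int) (dir : Int × Int) (data : List (List String)) : Prop :=
  ∃ k ∈ List.range (pvFuel data),
    (∀ i ∈ List.range k,
        pvGetCell data (pvPos point dir i) ≠ none ∧
        pvGetCell data (pvPos point dir i) ≠ some ".") ∧
    pvGetCell data (pvPos point dir k) = some "." ∧
    (∀ i ∈ List.range (k + 1), ∀ j ∈ List.range (k + 1), i ≠ j →
        pvEff (pvShape data) (pvPos point dir i) ≠ pvEff (pvShape data) (pvPos point dir j))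

instance (point : Int × Int) (dir : Int × Int) (data : List (List String)) : Decidable (Pre_push_boxes_left_right point dir data) := by
  unfold Pre_push_boxes_left_right; infer_instance

def pvWitness_push_boxes_left_right : (Int × Int) × (Int × Int) × List (List String) :=
  ((0, 0), (1, 0), [["O", "."]])

def Spec_push_boxes_left_right (point : Int × Int) (dir : Int × Int) (data : List (List String)) (out : List (List String)) : Prop := out = push_boxes_left_right_alt point dir data
instance (point : Int × Int) (dir : Int × Int) (data : List (List String)) (out : List (List String)) : Decidable (Spec_push_boxes_left_right point dir data out) := by unfold Spec_push_boxes_left_right; infer_instance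

-- ===== CLAIM (what is proved, stated in full; the proofs are below) =====
def Claim_equal_push_boxes_left_right : Prop := ∀ (point : Int × Int) (dir : Int × Int) (data : List (List String)), Dom_push_boxes_left_right point dir data → Pre_push_boxes_left_right point dir data → Spec_push_boxes_left_right point dir data (push_boxes_left_right point dir data)

-- ===== LEMMAS AND PROOFS =====

-- reading and writing through effective (normalised) coordinates
def pvGetEff (d : List (List String)) (e : Nat × Nat) : Option String :=
  (d[e.1]?).bind fun row => row[e.2]?

def pvWriteFold (d : List (List String)) (ws : List ((Nat × Nat) × String)) : List (List String) :=
  ws.foldl (fun d ew => pvSetEff d ew.1 ew.2) d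

theorem pvIdx_lt {n : Nat} {i : Int} {r : Nat} (h : PySem.List.pyIdx? n i = some r) : r < n := by
  unfold PySem.List.pyIdx? at h
  split_ifs at h with h1 h2 h3 <;> simp_all <;> omega

theorem pvShape_getD (d : List (List String)) (r : Nat) :
    (pvShape d).getD r 0 = (d.getD r []).length := by
  unfold pvShape
  by_cases h : r < d.length
  · rw [List.getD_eq_getElem?_getD, List.getD_eq_getElem?_getD,
      List.getElem?_eq_getElem (by simpa using h), List.getElem?_eq_getElem h]
    simp
  · rw [List.getD_eq_getElem?_getD, List.getD_eq_getElem?_getD,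
      List.getElem?_eq_none (by simpa using h), List.getElem?_eq_none (by omega)]
    simp

theorem pvEff_valid {sh : List Nat} {p : Int × Int} {e : Nat × Nat}
    (h : pvEff sh p = some e) : e.1 < sh.length ∧ e.2 < sh.getD e.1 0 := by
  unfold pvEff at h
  cases hr : PySem.List.pyIdx? sh.length p.2 with
  | none => rw [hr] at h; simp at h
  | some r =>
    rw [hr] at h
    cases hc : PySem.List.pyIdx? (sh.getD r 0) p.1 with
    | none => rw [Option.bind_some, hc] at h; simp at h
    | some c =>
      rw [Option.bind_some, hc] at h
      simp at h
      subst h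
      exact ⟨pvIdx_lt hr, pvIdx_lt hc⟩

theorem pvGetCell_eq (d : List (List String)) (p : Int × Int) :
    pvGetCell d p = (pvEff (pvShape d) p).bind (pvGetEff d) := by
  unfold pvGetCell pvEff
  simp only [PySem.List.pyGet?, pvShape, List.length_map, Option.bind_assoc]
  cases hr : PySem.List.pyIdx? d.length p.2 with
  | none => simp
  | some r =>
    simp only [Option.bind_some]
    have hrl : r < d.length := pvIdx_lt hr
    have hsh : (List.map List.length d).getD r 0 = d[r].length := by
      rw [List.getD_eq_getElem?_getD, List.getElem?_map, List.getElem?_eq_getElem hrl]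
      rfl
    rw [List.getElem?_eq_getElem hrl, Option.bind_some, hsh]
    cases hc : PySem.List.pyIdx? d[r].length p.1 with
    | none => simp
    | some c =>
      simp only [Option.bind_some]
      unfold pvGetEff
      rw [List.getElem?_eq_getElem hrl, Option.bind_some]

theorem pvShape_setEff (d : List (List String)) (e : Nat × Nat) (v : String) :
    pvShape (pvSetEff d e v) = pvShape d := by
  unfold pvShape pvSetEff
  rw [List.map_set]
  apply List.ext_getElem?
  intro n
  rw [List.getElem?_set]
  split
  · next heq =>
    subst heq
    split
    · next hlt =>
      have hlt' : e.1 < d.length := by simpa using hlt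
      rw [List.getElem?_map, List.getElem?_eq_getElem hlt']
      simp [List.getD_eq_getElem?_getD, List.getElem?_eq_getElem hlt']
    · next hlt =>
      have : d.length ≤ e.1 := by simpa using Nat.le_of_not_lt (by simpa using hlt)
      rw [List.getElem?_map, List.getElem?_eq_none (by omega)]
      rfl
  · rfl

theorem pvGetEff_setEff_self {d : List (List String)} {e : Nat × Nat} (v : String)
    (h1 : e.1 < d.length) (h2 : e.2 < (d.getD e.1 []).length) :
    pvGetEff (pvSetEff d e v) e = some v := by
  have h2' : e.2 < d[e.1].length := by
    rwa [List.getD_eq_getElem?_getD, List.getElem?_eq_getElem h1, Option.getD_some] at h2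
  unfold pvGetEff pvSetEff
  simp [h1, h2']

theorem pvGetEff_setEff_ne {d : List (List String)} {e e' : Nat × Nat} (v : String)
    (h : e ≠ e') : pvGetEff (pvSetEff d e v) e' = pvGetEff d e' := by
  unfold pvGetEff pvSetEff
  by_cases hr : e.1 = e'.1
  · have hc : e.2 ≠ e'.2 := fun hc => h (Prod.ext hr hc)
    rw [← hr]
    by_cases hlt : e.1 < d.length
    · simp [hlt, hc, List.getD_eq_getElem?_getD]
    · simp [hlt]
  · rw [List.getElem?_set_ne hr]

theorem pvSetEff_comm {d : List (List String)} {e e' : Nat × Nat} (v w : String)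
    (h : e ≠ e') : pvSetEff (pvSetEff d e v) e' w = pvSetEff (pvSetEff d e' w) e v := by
  obtain ⟨r, c⟩ := e
  obtain ⟨r', c'⟩ := e'
  by_cases hr : r = r'
  · subst hr
    have hc : c ≠ c' := by
      intro hc; exact h (by rw [hc])
    by_cases hlt : r < d.length
    · simp only [pvSetEff]
      have hgd : ∀ X : List String, (d.set r X).getD r [] = X := by
        intro X
        rw [List.getD_eq_getElem?_getD, List.getElem?_set]
        simp [hlt]
      rw [hgd, hgd, List.set_set, List.set_set, List.set_comm _ _ hc]
    · have hoob : ∀ X : List String, d.set r X = d :=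
        fun X => List.set_eq_of_length_le (by omega)
      simp [pvSetEff, hoob]
  · simp only [pvSetEff]
    have h1 : ∀ X : List String, (d.set r X).getD r' [] = d.getD r' [] := by
      intro X
      rw [List.getD_eq_getElem?_getD, List.getElem?_set_ne hr, ← List.getD_eq_getElem?_getD]
    have h2 : ∀ X : List String, (d.set r' X).getD r [] = d.getD r [] := by
      intro X
      rw [List.getD_eq_getElem?_getD, List.getElem?_set_ne (fun hh => hr hh.symm),
        ← List.getD_eq_getElem?_getD]
    rw [h1, h2, List.set_comm _ _ hr]

theorem pvSetEff_absorb (d : List (List String)) (e : Nat × Nat) (v w : String) :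
    pvSetEff (pvSetEff d e v) e w = pvSetEff d e w := by
  obtain ⟨r, c⟩ := e
  by_cases hlt : r < d.length
  · simp only [pvSetEff]
    have hgd : ∀ X : List String, (d.set r X).getD r [] = X := by
      intro X
      rw [List.getD_eq_getElem?_getD, List.getElem?_set]
      simp [hlt]
    rw [hgd, List.set_set, List.set_set]
  · have hoob : ∀ X : List String, d.set r X = d :=
      fun X => List.set_eq_of_length_le (by omega)
    simp [pvSetEff, hoob]

theorem pvSetEff_self {d : List (List String)} {e : Nat × Nat} {w : String}
    (h : pvGetEff d e = some w) : pvSetEff d e w = d := by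
  unfold pvGetEff at h
  cases hrow : d[e.1]? with
  | none => rw [hrow] at h; simp at h
  | some row =>
    rw [hrow, Option.bind_some] at h
    have hlt : e.1 < d.length := by
      by_contra hh
      rw [List.getElem?_eq_none (by omega)] at hrow
      simp at hrow
    have hrow' : row = d[e.1] := by
      rw [List.getElem?_eq_getElem hlt] at hrow
      exact (Option.some.injEq _ _).mp hrow.symm
    have hc : e.2 < row.length := by
      by_contra hh
      rw [List.getElem?_eq_none (by omega)] at h
      simp at h
    have hw : w = row[e.2] := by
      rw [List.getElem?_eq_getElem hc] at h
      exact (Option.some.injEq _ _).mp h.symm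
    subst hrow'
    subst hw
    unfold pvSetEff
    rw [List.getD_eq_getElem?_getD, hrow, Option.getD_some,
      List.set_getElem_self hc, List.set_getElem_self hlt]

theorem pvWriteFold_set_notmem {d : List (List String)} {e : Nat × Nat} {v : String}
    {ws : List ((Nat × Nat) × String)} (h : e ∉ ws.map Prod.fst) :
    pvWriteFold (pvSetEff d e v) ws = pvSetEff (pvWriteFold d ws) e v := by
  induction ws generalizing d with
  | nil => rfl
  | cons hd t ih =>
    simp only [List.map_cons, List.mem_cons, not_or] at h
    unfold pvWriteFold
    simp only [List.foldl_cons]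
    rw [pvSetEff_comm v hd.2 h.1]
    exact ih h.2

theorem pvWriteFold_set_mem {d : List (List String)} {e : Nat × Nat} {v : String}
    {ws : List ((Nat × Nat) × String)} (h : e ∈ ws.map Prod.fst) :
    pvWriteFold (pvSetEff d e v) ws = pvWriteFold d ws := by
  induction ws generalizing d with
  | nil => simp at h
  | cons hd t ih =>
    unfold pvWriteFold
    simp only [List.foldl_cons]
    by_cases heq : e = hd.1
    · subst heq
      rw [pvSetEff_absorb]
    · simp only [List.map_cons, List.mem_cons] at h
      rcases h with h | h
      · exact absurd h heq
      · rw [pvSetEff_comm v hd.2 heq]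
        exact ih h

theorem pvPos_zero (point dir : Int × Int) : pvPos point dir 0 = point := by
  simp [pvPos]

theorem pvPos_shift (point dir : Int × Int) (i : Nat) :
    pvPos (point.1 + dir.1, point.2 + dir.2) dir i = pvPos point dir (i + 1) := by
  simp only [pvPos, Prod.mk.injEq]
  constructor <;> push_cast <;> ring

-- A's while loop returns exactly the ray of visited points.
theorem pvWalkA_spec (dir : Int × Int) (data : List (List String)) :
    ∀ (k : Nat) (start : Int × Int) (f : Nat) (acc : List (Int × Int)),
      (∀ i, i < k → ∃ v, pvGetCell data (pvPos start dir i) = some v ∧ v ≠ ".") →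
      pvGetCell data (pvPos start dir k) = some "." →
      k < f →
      pvWalkA dir data f start acc
        = some (acc ++ (List.range (k + 1)).map (pvPos start dir)) := by
  intro k
  induction k with
  | zero =>
    intro start f acc _ hdot hf
    match f, hf with
    | f + 1, _ =>
      rw [pvPos_zero] at hdot
      simp [pvWalkA, hdot, pvPos_zero]
  | succ k ih =>
    intro start f acc hwalk hdot hf
    match f, hf with
    | f + 1, hf =>
      obtain ⟨v0, hv0, hv0ne⟩ := hwalk 0 (Nat.succ_pos k)
      rw [pvPos_zero] at hv0
      have hrec := ih (start.1 + dir.1, start.2 + dir.2) f (acc ++ [start])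
        (fun i hi => by rw [pvPos_shift]; exact hwalk (i + 1) (by omega))
        (by rw [pvPos_shift]; exact hdot)
        (by omega)
      simp only [pvWalkA, hv0]
      rw [if_neg hv0ne, hrec]
      congr 1
      rw [List.append_assoc]
      congr 1
      have hmap : (List.range (k + 1 + 1)).map (pvPos start dir)
          = start :: (List.range (k + 1)).map (pvPos (start.1 + dir.1, start.2 + dir.2) dir) := by
        rw [List.range_succ_eq_map, List.map_cons, List.map_map, pvPos_zero]
        congr 1
        apply List.map_congr_left
        intro i _
        show pvPos start dir (i + 1) = pvPos (start.1 + dir.1, start.2 + dir.2) dir i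
        rw [pvPos_shift]
      rw [hmap]
      rfl

theorem pvRange_down (k : Nat) :
    PySem.List.pyRange (k : Int) 0 (-1)
      = (List.range k).map (fun (j : Nat) => (k : Int) - (j : Int)) := by
  rcases Nat.eq_zero_or_pos k with hk | hk
  · subst hk; simp [PySem.List.pyRange]
  · have h1 : (0 : Int) < (k : Int) := by exact_mod_cast hk
    simp only [PySem.List.pyRange]
    norm_num [h1]
    rw [if_pos hk]
    apply List.map_congr_left
    intro j _
    simp [sub_eq_add_neg]

theorem pvGetCell_of_eff {d : List (List String)} {sh0 : List Nat} {p : Int × Int}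
    {e : Nat × Nat} (hsh : pvShape d = sh0) (he : pvEff sh0 p = some e) :
    pvGetCell d p = pvGetEff d e := by
  rw [pvGetCell_eq, hsh, he, Option.bind_some]

theorem pvSetCell_of_eff {d : List (List String)} {sh0 : List Nat} {p : Int × Int}
    {e : Nat × Nat} (hsh : pvShape d = sh0) (he : pvEff sh0 p = some e) (v : String) :
    pvSetCell d p v = pvSetEff d e v := by
  unfold pvSetCell
  rw [hsh, he]

theorem pvEff_valid' {d : List (List String)} {sh0 : List Nat} {p : Int × Int}
    {e : Nat × Nat} (hsh : pvShape d = sh0) (he : pvEff sh0 p = some e) :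
    e.1 < d.length ∧ e.2 < (d.getD e.1 []).length := by
  have hv := pvEff_valid he
  rw [← hsh] at hv
  have hlen : (pvShape d).length = d.length := by simp [pvShape]
  rw [pvShape_getD] at hv
  omega

theorem pvWriteFold_cons (d : List (List String)) (x : (Nat × Nat) × String)
    (ws : List ((Nat × Nat) × String)) :
    pvWriteFold d (x :: ws) = pvWriteFold (pvSetEff d x.1 x.2) ws := rfl

theorem pvWriteFold_append_one (d : List (List String))
    (ws : List ((Nat × Nat) × String)) (x : (Nat × Nat) × String) :
    pvWriteFold d (ws ++ [x]) = pvSetEff (pvWriteFold d ws) x.1 x.2 := by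
  unfold pvWriteFold
  rw [List.foldl_append, List.foldl_cons, List.foldl_nil]

-- the backward swap pass writes v (i-1) into cell i and the final value into cell 0
theorem pvSwapPhase (sh0 : List Nat) (pos : Nat → Int × Int) (e : Nat → Nat × Nat) :
    ∀ (m : Nat) (d : List (List String)) (u : Nat → String),
      pvShape d = sh0 →
      (∀ i, i ≤ m → pvEff sh0 (pos i) = some (e i)) →
      (∀ i j, i ≤ m → j ≤ m → i ≠ j → e i ≠ e j) →
      (∀ i, i ≤ m → pvGetEff d (e i) = some (u i)) →
      (List.range m).foldl (fun d j => pvSwapStep d (pos (m - j)) (pos (m - j - 1))) d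
        = pvWriteFold d ((e 0, u m) :: (List.range m).map (fun i => (e (i + 1), u i))) := by
  intro m
  induction m with
  | zero =>
    intro d u _ _ _ hget
    simp only [List.range_zero, List.foldl_nil, List.map_nil]
    unfold pvWriteFold
    rw [List.foldl_cons, List.foldl_nil, pvSetEff_self (hget 0 le_rfl)]
  | succ m ih =>
    intro d u hsh heff hne hget
    have hsh1 : pvShape (pvSetEff d (e (m + 1)) (u m)) = sh0 := by
      rw [pvShape_setEff, hsh]
    have hgc1 : pvGetCell d (pos (m + 1)) = some (u (m + 1)) := by
      rw [pvGetCell_of_eff hsh (heff (m + 1) le_rfl)]; exact hget (m + 1) le_rfl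
    have hgc0 : pvGetCell d (pos m) = some (u m) := by
      rw [pvGetCell_of_eff hsh (heff m (by omega))]; exact hget m (by omega)
    have hstep : pvSwapStep d (pos (m + 1)) (pos m)
        = pvSetEff (pvSetEff d (e (m + 1)) (u m)) (e m) (u (m + 1)) := by
      unfold pvSwapStep
      rw [hgc1, hgc0]
      show pvSetCell (pvSetCell d (pos (m + 1)) (u m)) (pos m) (u (m + 1))
          = pvSetEff (pvSetEff d (e (m + 1)) (u m)) (e m) (u (m + 1))
      rw [pvSetCell_of_eff hsh (heff (m + 1) le_rfl),
        pvSetCell_of_eff hsh1 (heff m (by omega))]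
    rw [List.range_succ_eq_map, List.foldl_cons]
    have hfn : (fun (d : List (List String)) j =>
          pvSwapStep d (pos (m + 1 - Nat.succ j)) (pos (m + 1 - Nat.succ j - 1)))
        = fun d j => pvSwapStep d (pos (m - j)) (pos (m - j - 1)) := by
      funext d j
      congr 2 <;> omega
    have hfirst : pvSwapStep d (pos (m + 1 - 0)) (pos (m + 1 - 0 - 1))
        = pvSetEff (pvSetEff d (e (m + 1)) (u m)) (e m) (u (m + 1)) := by
      simpa using hstep
    rw [hfirst, List.foldl_map, hfn]
    set d1 := pvSetEff (pvSetEff d (e (m + 1)) (u m)) (e m) (u (m + 1)) with hd1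
    have hsh2 : pvShape d1 = sh0 := by rw [hd1, pvShape_setEff, pvShape_setEff, hsh]
    have hvm : (e m).1 < (pvSetEff d (e (m + 1)) (u m)).length ∧
        (e m).2 < ((pvSetEff d (e (m + 1)) (u m)).getD (e m).1 []).length :=
      pvEff_valid' hsh1 (heff m (by omega))
    have hget1 : ∀ i, i ≤ m → pvGetEff d1 (e i)
        = some (if i = m then u (m + 1) else u i) := by
      intro i hi
      by_cases him : i = m
      · subst him
        rw [if_pos rfl, hd1]
        exact pvGetEff_setEff_self _ hvm.1 hvm.2
      · rw [if_neg him, hd1,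
          pvGetEff_setEff_ne _ (hne m i (by omega) (by omega) (fun hh => him hh.symm)),
          pvGetEff_setEff_ne _ (hne (m + 1) i (by omega) (by omega) (by omega))]
        exact hget i (by omega)
    have hih := ih d1 (fun i => if i = m then u (m + 1) else u i) hsh2
      (fun i hi => heff i (by omega))
      (fun i j hi hj hij => hne i j (by omega) (by omega) hij)
      hget1
    rw [hih]
    have hL : ((e 0, if m = m then u (m + 1) else u m) ::
          (List.range m).map (fun i => (e (i + 1), if i = m then u (m + 1) else u i)))
        = (e 0, u (m + 1)) :: (List.range m).map (fun i => (e (i + 1), u i)) := by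
      rw [if_pos rfl]
      congr 1
      apply List.map_congr_left
      intro i hi
      rw [List.mem_range] at hi
      rw [if_neg (by omega)]
    rw [hL]
    have hmem : e m ∈ ((e 0, u (m + 1)) ::
        (List.range m).map fun i => (e (i + 1), u i)).map Prod.fst := by
      simp only [List.map_cons, List.map_map, List.mem_cons]
      rcases Nat.eq_zero_or_pos m with h0 | h0
      · left; rw [h0]
      · right
        refine List.mem_map.mpr ⟨m - 1, List.mem_range.mpr (by omega), ?_⟩
        show e (m - 1 + 1) = e m
        congr 1
        omega
    have hnotmem : e (m + 1) ∉ ((e 0, u (m + 1)) ::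
        (List.range m).map fun i => (e (i + 1), u i)).map Prod.fst := by
      simp only [List.map_cons, List.map_map, List.mem_cons, not_or]
      constructor
      · exact fun hh => hne (m + 1) 0 (by omega) (by omega) (by omega) hh
      · intro hh
        obtain ⟨i, hi, hieq⟩ := List.mem_map.mp hh
        rw [List.mem_range] at hi
        exact hne (m + 1) (i + 1) (by omega) (by omega) (by omega) hieq.symm
    rw [hd1, pvWriteFold_set_mem hmem, pvWriteFold_set_notmem hnotmem,
      ← List.range_succ_eq_map]
    have hR : ((e 0, u (m + 1)) :: (List.range (m + 1)).map (fun i => (e (i + 1), u i)))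
        = ((e 0, u (m + 1)) :: (List.range m).map (fun i => (e (i + 1), u i)))
            ++ [(e (m + 1), u m)] := by
      rw [List.range_succ, List.map_append]
      rfl
    rw [hR, pvWriteFold_append_one]

-- B's carry loop produces the same family of writes, front to back
theorem pvLoopPhase (sh0 : List Nat) (dir : Int × Int) (pos : Nat → Int × Int)
    (e : Nat → Nat × Nat) (v : Nat → String) (k : Nat)
    (hpos : ∀ i, pos (i + 1) = ((pos i).1 + dir.1, (pos i).2 + dir.2))
    (hne : ∀ i j, i ≤ k → j ≤ k → i ≠ j → e i ≠ e j)
    (hdot : v k = ".") (hnd : ∀ i, i < k → v i ≠ ".")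
    (heff : ∀ i, i ≤ k → pvEff sh0 (pos i) = some (e i)) :
    ∀ (m j : Nat) (d : List (List String)) (c : String) (f : Nat),
      j + m = k → m < f → pvShape d = sh0 →
      (∀ i, j ≤ i → i ≤ k → pvGetEff d (e i) = some (v i)) →
      pvLoopB dir f (pos j) c d
        = pvWriteFold d ((e j, c) :: (List.range m).map (fun t => (e (j + 1 + t), v (j + t)))) := by
  intro m
  induction m with
  | zero =>
    intro j d c f hjm hf hsh hget
    match f, hf with
    | f + 1, _ =>
      have hj : j = k := by omega
      subst hj
      have hgc : pvGetCell d (pos j) = some (v j) := by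
        rw [pvGetCell_of_eff hsh (heff j le_rfl)]
        exact hget j le_rfl le_rfl
      simp only [pvLoopB, hgc, hdot, if_pos]
      rw [pvSetCell_of_eff hsh (heff j le_rfl)]
      unfold pvWriteFold
      rw [List.range_zero, List.map_nil, List.foldl_cons, List.foldl_nil]
  | succ m ih =>
    intro j d c f hjm hf hsh hget
    match f, hf with
    | f + 1, hf =>
      have hjk : j < k := by omega
      have hgc : pvGetCell d (pos j) = some (v j) := by
        rw [pvGetCell_of_eff hsh (heff j (by omega))]
        exact hget j le_rfl (by omega)
      simp only [pvLoopB, hgc]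
      rw [if_neg (hnd j hjk), pvSetCell_of_eff hsh (heff j (by omega)), ← hpos j]
      have hget' : ∀ i, j + 1 ≤ i → i ≤ k →
          pvGetEff (pvSetEff d (e j) c) (e i) = some (v i) := by
        intro i h1 h2
        rw [pvGetEff_setEff_ne _ (hne j i (by omega) h2 (by omega))]
        exact hget i (by omega) h2
      have hih := ih (j + 1) (pvSetEff d (e j) c) (v j) f (by omega) (by omega)
        (by rw [pvShape_setEff, hsh]) hget'
      rw [hih]
      have hlist : ((e (j + 1), v j) ::
            (List.range m).map (fun t => (e (j + 1 + 1 + t), v (j + 1 + t))))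
          = (List.range (m + 1)).map (fun t => (e (j + 1 + t), v (j + t))) := by
        rw [List.range_succ_eq_map, List.map_cons, List.map_map]
        congr 1
        apply List.map_congr_left
        intro t _
        have h1 : j + 1 + 1 + t = j + 1 + Nat.succ t := by omega
        have h2 : j + 1 + t = j + Nat.succ t := by omega
        show (e (j + 1 + 1 + t), v (j + 1 + t)) = (e (j + 1 + Nat.succ t), v (j + Nat.succ t))
        rw [h1, h2]
      conv_rhs => rw [pvWriteFold_cons, ← hlist]

-- ===== VERDICT (by name: the statement is the Claim_ definition above) =====
theorem pvPos_step (point dir : Int × Int) (i : Nat) :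
    pvPos point dir (i + 1) = ((pvPos point dir i).1 + dir.1, (pvPos point dir i).2 + dir.2) := by
  simp only [pvPos, Prod.mk.injEq]
  constructor <;> push_cast <;> ring

theorem pvFold_down (k : Nat) (g : List (List String) → Int → List (List String))
    (d : List (List String)) :
    (PySem.List.pyRange (k : Int) 0 (-1)).foldl g d
      = (List.range k).foldl (fun (d : List (List String)) (j : Nat) => g d ((k : Int) - (j : Int))) d := by
  rw [pvRange_down, List.foldl_map]

theorem pvPushA_eq_of_walk {point dir : Int × Int} {data : List (List String)}
    {pts : List (Int × Int)} (h : pvWalkA dir data (pvFuel data) point [] = some pts) :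
    push_boxes_left_right point dir data
      = (PySem.List.pyRange ((pts.length : Int) - 1) 0 (-1)).foldl
          (fun d idx =>
            match PySem.List.pyGet? pts idx, PySem.List.pyGet? pts (idx - 1) with
            | some p1, some p2 => pvSwapStep d p1 p2
            | _, _ => d) data := by
  unfold push_boxes_left_right
  rw [h]

theorem push_boxes_left_right_spec : Claim_equal_push_boxes_left_right := by
  intro point dir data _ hpre
  unfold Spec_push_boxes_left_right
  obtain ⟨k, hkmem, hwalk, hdot, hdist⟩ := hpre
  rw [List.mem_range] at hkmem
  have hv : ∀ i, i ≤ k → pvGetCell data (pvPos point dir i)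
      = some ((pvGetCell data (pvPos point dir i)).getD "") := by
    intro i hi
    rcases Nat.lt_or_ge i k with hik | hik
    · have h1 := (hwalk i (List.mem_range.mpr hik)).1
      cases hcc : pvGetCell data (pvPos point dir i) with
      | none => exact absurd hcc h1
      | some w => rfl
    · have hik' : i = k := by omega
      subst hik'
      rw [hdot]
      rfl
  set v : Nat → String := fun i => (pvGetCell data (pvPos point dir i)).getD "" with hvdef
  have hvk : v k = "." := by rw [hvdef]; simp only [hdot]; rfl
  have hvne : ∀ i, i < k → v i ≠ "." := by
    intro i hi hcontra
    apply (hwalk i (List.mem_range.mpr hi)).2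
    rw [hv i (by omega)]
    rw [show (pvGetCell data (pvPos point dir i)).getD "" = v i from rfl, hcontra]
  have heff : ∀ i, i ≤ k → pvEff (pvShape data) (pvPos point dir i)
      = some ((pvEff (pvShape data) (pvPos point dir i)).getD (0, 0)) := by
    intro i hi
    have hvc := hv i hi
    rw [pvGetCell_eq] at hvc
    cases hee : pvEff (pvShape data) (pvPos point dir i) with
    | none => rw [hee] at hvc; simp at hvc
    | some ee => rfl
  set e : Nat → Nat × Nat := fun i => (pvEff (pvShape data) (pvPos point dir i)).getD (0, 0)
    with hedef
  have hne : ∀ i j, i ≤ k → j ≤ k → i ≠ j → e i ≠ e j := by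
    intro i j hi hj hij hcon
    apply hdist i (List.mem_range.mpr (by omega)) j (List.mem_range.mpr (by omega)) hij
    rw [heff i hi, heff j hj]
    rw [hedef] at hcon
    simp only at hcon
    rw [hcon]
  have hgetE : ∀ i, i ≤ k → pvGetEff data (e i) = some (v i) := by
    intro i hi
    have hchain : pvGetCell data (pvPos point dir i) = pvGetEff data (e i) := by
      rw [pvGetCell_eq, heff i hi, Option.bind_some]
    rw [← hchain]
    exact hv i hi
  -- ===== A side =====
  have hwalkA := pvWalkA_spec dir data k point (pvFuel data) []
    (fun i hi => ⟨v i, hv i (by omega), hvne i hi⟩) hdot (by omega)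
  rw [List.nil_append] at hwalkA
  rw [pvPushA_eq_of_walk hwalkA]
  have hlen : ((List.range (k + 1)).map (pvPos point dir)).length = k + 1 := by simp
  have hcastk : ((k + 1 : Nat) : Int) - 1 = (k : Int) := by push_cast; ring
  rw [hlen, hcastk]
  have hfold := pvFold_down k
    (fun d idx =>
      match PySem.List.pyGet? ((List.range (k + 1)).map (pvPos point dir)) idx,
        PySem.List.pyGet? ((List.range (k + 1)).map (pvPos point dir)) (idx - 1) with
      | some p1, some p2 => pvSwapStep d p1 p2
      | _, _ => d) data
  rw [hfold]
  have hswap := pvSwapPhase (pvShape data) (pvPos point dir) e k data v rfl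
    (fun i hi => heff i hi) hne (fun i hi => hgetE i hi)
  have hbody : List.foldl
      (fun (d : List (List String)) (j : Nat) =>
        match PySem.List.pyGet? ((List.range (k + 1)).map (pvPos point dir)) ((k : Int) - (j : Int)),
          PySem.List.pyGet? ((List.range (k + 1)).map (pvPos point dir)) ((k : Int) - (j : Int) - 1) with
        | some p1, some p2 => pvSwapStep d p1 p2
        | _, _ => d) data (List.range k)
      = List.foldl (fun d j => pvSwapStep d (pvPos point dir (k - j)) (pvPos point dir (k - j - 1)))
          data (List.range k) := by
    apply PySem.List.foldl_congr_mem
    intro acc j hj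
    rw [List.mem_range] at hj
    have hc2 : (k : Int) - (j : Int) - 1 = ((k - j - 1 : Nat) : Int) := by omega
    have hc1 : (k : Int) - (j : Int) = ((k - j : Nat) : Int) := by omega
    rw [hc2, hc1, PySem.List.pyGet?_natCast, PySem.List.pyGet?_natCast,
      List.getElem?_map, List.getElem?_map,
      List.getElem?_range (by omega : k - j < k + 1),
      List.getElem?_range (by omega : k - j - 1 < k + 1)]
    rfl
  rw [hbody, hswap]
  -- ===== B side =====
  unfold push_boxes_left_right_alt
  have hloop := pvLoopPhase (pvShape data) dir (pvPos point dir) e v k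
    (pvPos_step point dir) hne hvk hvne (fun i hi => heff i hi)
    k 0 data "." (pvFuel data) (by omega) (by omega) rfl
    (fun i _ hi => hgetE i hi)
  rw [pvPos_zero] at hloop
  rw [hloop, hvk]
  congr 1
  congr 1
  apply List.map_congr_left
  intro t ht
  have h1 : 0 + 1 + t = t + 1 := by omega
  have h2 : 0 + t = t := by omega
  rw [h1, h2]
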